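-- pv_equiv track=rewrite | github.com/shatianming5/open-problem-atlas | verifiers/checkers/math/total_coloring_checker.py | _can_total_color
-- ===== SOURCE A (Python) =====
-- def _can_total_color(adj: list[set[int]], n: int, k: int) -> bool:
--     """Check if graph has a total coloring with k colors."""
--     edges = []
--     for u in range(n):
--         for v in adj[u]:
--             if u < v:
--                 edges.append((u, v))
--     m = len(edges)
--     # Assign colors to vertices (0..n-1) and edges (n..n+m-1)
--     total = n + m
--     color = [-1] * total
--
--     # Build conflict graph
--     conflicts = [set() for _ in range(total)]
--     # Adjacent vertices conflict
--     for u in range(n):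
--         for v in adj[u]:
--             conflicts[u].add(v)
--     # Incident edges conflict
--     for i, (u1, v1) in enumerate(edges):
--         for j, (u2, v2) in enumerate(edges):
--             if i < j and (u1 == u2 or u1 == v2 or v1 == u2 or v1 == v2):
--                 conflicts[n + i].add(n + j)
--                 conflicts[n + j].add(n + i)
--     # Vertex-edge incidence conflicts
--     for i, (u, v) in enumerate(edges):
--         conflicts[u].add(n + i)
--         conflicts[n + i].add(u)
--         conflicts[v].add(n + i)
--         conflicts[n + i].add(v)
--
--     def bt(idx: int) -> bool:
--         if idx == total:
--             return True
--         for c in range(k):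
--             if all(color[nb] != c for nb in conflicts[idx] if color[nb] >= 0):
--                 color[idx] = c
--                 if bt(idx + 1):
--                     return True
--                 color[idx] = -1
--         return False
--
--     return bt(0)
-- ===== SOURCE B (Python) =====
-- def _can_total_color(adj: list[set[int]], n: int, k: int) -> bool:
--     """Check if graph has a total coloring with k colors."""
--     edges = [(u, v) for u in range(n) for v in adj[u] if u < v]
--     total = n + len(edges)
--     # pred[x] = the conflict partners of item x that carry a smaller index.
--     # Vertices: neighbours listed in adj[u] that are smaller than u.
--     pred = [[v for v in adj[u] if 0 <= v < u] for u in range(n)]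
--     # Edges: both endpoints, plus every earlier edge sharing an endpoint,
--     # found through an incidence index (vertex -> indices of its edges so far).
--     inc = [[] for _ in range(n)]
--     for i, (u, v) in enumerate(edges):
--         pred.append([u, v] + [n + j for j in inc[u]] + [n + j for j in inc[v]])
--         inc[u].append(i)
--         inc[v].append(i)
--
--     def assign(colors: list[int], idx: int) -> bool:
--         if idx == total:
--             return True
--         for c in range(k):
--             if all(colors[p] != c for p in pred[idx]):
--                 if assign(colors + [c], idx + 1):
--                     return True
--         return False
--
--     return assign([], 0)
-- ===== Notes on version B (the rewrite author's own statement) =====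
-- stated objective: alternative
-- what changed: B drops the mutable conflict-set graph and the O(m^2) all-pairs edge scan: it precomputes for every item (vertex or edge) the list of smaller-indexed conflict partners -- edge/edge conflicts found via a vertex-to-incident-edge index built in one pass -- and the backtracking threads an immutable prefix list of assigned colors instead of filtering a color array by >=0 at every probe.
-- outside the precondition, e.g. on _can_total_color([set(), {-2}], 2, 1): A returns False, B returns True
import Mathlib
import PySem

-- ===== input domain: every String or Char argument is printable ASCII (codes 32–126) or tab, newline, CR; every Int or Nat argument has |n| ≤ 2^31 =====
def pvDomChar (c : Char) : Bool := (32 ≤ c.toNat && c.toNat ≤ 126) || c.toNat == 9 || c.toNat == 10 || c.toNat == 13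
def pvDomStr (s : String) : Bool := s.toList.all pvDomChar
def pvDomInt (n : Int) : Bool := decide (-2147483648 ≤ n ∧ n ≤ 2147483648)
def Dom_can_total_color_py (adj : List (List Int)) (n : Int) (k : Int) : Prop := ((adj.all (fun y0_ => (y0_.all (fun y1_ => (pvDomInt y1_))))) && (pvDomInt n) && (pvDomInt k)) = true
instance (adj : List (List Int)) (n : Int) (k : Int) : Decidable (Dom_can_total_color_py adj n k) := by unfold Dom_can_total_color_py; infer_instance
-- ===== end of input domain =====

-- B replaces A's mutable conflict-set graph (built with an O(m^2) all-pairs edge scan) by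
-- per-item lists of smaller-indexed conflict partners obtained through a vertex→incident-edge
-- index, and the backtracking threads an immutable prefix list of assigned colors. (objective: alternative)

-- ===== PORT A =====
-- conflicts[i].add(x); pySetD/pyGetD are Python-exact whenever i is in range (Pre_ keeps every touched index in range)
def pvAddAt (cs : List (PySem.Set Int)) (i : Int) (x : Int) : List (PySem.Set Int) :=
  PySem.List.pySetD cs i (PySem.Set.add (PySem.List.pyGetD cs i []) x)

-- the closure bt(idx); fuel = total - idx (the recursion depth Python actually performs)
def pvBtA (total k : Int) (conflicts : List (PySem.Set Int)) : Nat → Int → List Int → Bool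
  | fuel, idx, color =>
    if idx == total then true
    else
      match fuel with
      | 0 => false
      | fuel' + 1 =>
        (PySem.List.pyRange 0 k 1).any (fun c =>
          ((PySem.List.pyGetD conflicts idx []).filter
              (fun nb => decide (0 ≤ PySem.List.pyGetD color nb (-1)))).all
            (fun nb => PySem.List.pyGetD color nb (-1) != c)
          && pvBtA total k conflicts fuel' (idx + 1) (PySem.List.pySetD color idx c))

def can_total_color_py (adj : List (List Int)) (n : Int) (k : Int) : Bool :=
  let edges : List (Int × Int) :=
    (PySem.List.pyRange 0 n 1).foldl (fun es u =>
      (PySem.List.pyGetD adj u []).foldl (fun es2 v => if u < v then es2 ++ [(u, v)] else es2) es) []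
  let m : Int := edges.length
  let total : Int := n + m
  let color : List Int := PySem.List.pyRepeat [(-1 : Int)] total
  let conflicts : List (PySem.Set Int) := (PySem.List.pyRange 0 total 1).map (fun _ => PySem.Set.empty)
  -- adjacent vertices conflict
  let conflicts := (PySem.List.pyRange 0 n 1).foldl (fun cs u =>
      (PySem.List.pyGetD adj u []).foldl (fun cs2 v => pvAddAt cs2 u v) cs) conflicts
  -- incident edges conflict
  let conflicts := (PySem.List.enumerate edges).foldl (fun cs ie =>
      (PySem.List.enumerate edges).foldl (fun cs2 je =>
        if ie.1 < je.1 && (ie.2.1 == je.2.1 || ie.2.1 == je.2.2 || ie.2.2 == je.2.1 || ie.2.2 == je.2.2)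
        then pvAddAt (pvAddAt cs2 (n + ie.1) (n + je.1)) (n + je.1) (n + ie.1)
        else cs2) cs) conflicts
  -- vertex-edge incidence conflicts
  let conflicts := (PySem.List.enumerate edges).foldl (fun cs ie =>
      pvAddAt (pvAddAt (pvAddAt (pvAddAt cs ie.2.1 (n + ie.1)) (n + ie.1) ie.2.1) ie.2.2 (n + ie.1)) (n + ie.1) ie.2.2) conflicts
  pvBtA total k conflicts total.toNat 0 color

-- ===== PORT B =====
-- assign(colors, idx) of Source B: colors is the list of colors of items 0..idx-1
def pvAssign (total k : Int) (pred : List (List Int)) : Nat → Int → List Int → Bool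
  | fuel, idx, colors =>
    if idx == total then true
    else
      match fuel with
      | 0 => false
      | fuel' + 1 =>
        (PySem.List.pyRange 0 k 1).any (fun c =>
          (PySem.List.pyGetD pred idx []).all (fun p => PySem.List.pyGetD colors p (-1) != c)
          && pvAssign total k pred fuel' (idx + 1) (colors ++ [c]))

-- the body of Source B's for-loop over enumerate(edges): appends the pred entry for edge i,
-- then records i in the incidence lists of both endpoints
def pvBuildStep (n : Int) (st : List (List Int) × List (List Int)) (ie : Int × (Int × Int)) :
    List (List Int) × List (List Int) :=
  let i := ie.1; let u := ie.2.1; let v := ie.2.2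
  let pred := st.1 ++ [[u, v]
    ++ (PySem.List.pyGetD st.2 u []).map (fun j => n + j)
    ++ (PySem.List.pyGetD st.2 v []).map (fun j => n + j)]
  let inc := PySem.List.pySetD st.2 u (PySem.List.pyGetD st.2 u [] ++ [i])
  let inc2 := PySem.List.pySetD inc v (PySem.List.pyGetD inc v [] ++ [i])
  (pred, inc2)

def can_total_color_py_alt (adj : List (List Int)) (n : Int) (k : Int) : Bool :=
  let edges : List (Int × Int) :=
    (PySem.List.pyRange 0 n 1).flatMap (fun u =>
      ((PySem.List.pyGetD adj u []).filter (fun v => decide (u < v))).map (fun v => (u, v)))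
  let total : Int := n + edges.length
  let pred0 : List (List Int) :=
    (PySem.List.pyRange 0 n 1).map (fun u =>
      (PySem.List.pyGetD adj u []).filter (fun v => decide (0 ≤ v) && decide (v < u)))
  let inc0 : List (List Int) := (PySem.List.pyRange 0 n 1).map (fun _ => [])
  let st := (PySem.List.enumerate edges).foldl (pvBuildStep n) (pred0, inc0)
  pvAssign total k st.1 total.toNat 0 []

-- ===== PRECONDITION & SPEC =====
-- Pre_ restricts to the natural domain: 0 ≤ n ≤ len(adj) and every row up to n a duplicate-free
-- (rows are Python sets) list of neighbours in [0, n).  Outside it A raises IndexError or reads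
-- the color array through Python's negative-index wraparound (an artefact B does not mimic);
-- the trivial corner n < 0 ∧ k ≤ 0, where A returns False before touching anything, is kept.
def Pre_can_total_color_py (adj : List (List Int)) (n : Int) (k : Int) : Prop :=
  (n < 0 ∧ k ≤ 0) ∨
  (0 ≤ n ∧ n ≤ (adj.length : Int) ∧
    ∀ row ∈ adj.take n.toNat, row.Nodup ∧ ∀ v ∈ row, 0 ≤ v ∧ v < n)
instance (adj : List (List Int)) (n : Int) (k : Int) : Decidable (Pre_can_total_color_py adj n k) := by
  unfold Pre_can_total_color_py; infer_instance

def pvWitness_can_total_color_py : List (List Int) × Int × Int := ([[1], [0]], 2, 3)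

def Spec_can_total_color_py (adj : List (List Int)) (n : Int) (k : Int) (out : Bool) : Prop := out = can_total_color_py_alt adj n k
instance (adj : List (List Int)) (n : Int) (k : Int) (out : Bool) : Decidable (Spec_can_total_color_py adj n k out) := by unfold Spec_can_total_color_py; infer_instance

-- ===== CLAIM (what is proved, stated in full; the proofs are below) =====
def Claim_equal_can_total_color_py : Prop := ∀ (adj : List (List Int)) (n : Int) (k : Int), Dom_can_total_color_py adj n k → Pre_can_total_color_py adj n k → Spec_can_total_color_py adj n k (can_total_color_py adj n k)

-- ===== LEMMAS AND PROOFS =====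
def pvStep (cs : List (PySem.Set Int)) (p : Int × Int) : List (PySem.Set Int) := pvAddAt cs p.1 p.2

theorem pv_pyGetD_eq {α : Type} (xs : List α) (i : Int) (d : α) (h0 : 0 ≤ i) (h : i < (xs.length : Int)) :
    PySem.List.pyGetD xs i d = xs[i.toNat]'(by omega) :=
  PySem.List.pyGetD_eq_getElem xs d h0 h

theorem pv_pyGetD_pySetD {α : Type} (xs : List α) (i w : Int) (v d : α)
    (hi0 : 0 ≤ i) (hi : i < (xs.length : Int)) (hw0 : 0 ≤ w) (hw : w < (xs.length : Int)) :
    PySem.List.pyGetD (PySem.List.pySetD xs i v) w d = if w = i then v else PySem.List.pyGetD xs w d := by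
  rw [PySem.List.pySetD_of_nonneg xs v hi0]
  rw [pv_pyGetD_eq _ w d hw0 (by simpa using hw)]
  rw [List.getElem_set]
  split_ifs with h1 h2 h3
  · rfl
  · omega
  · omega
  · rw [pv_pyGetD_eq xs w d hw0 hw]

theorem pv_length_pvAddAt (cs : List (PySem.Set Int)) (i x : Int) :
    (pvAddAt cs i x).length = cs.length := by
  simp [pvAddAt, PySem.List.length_pySetD]

theorem pv_mem_pvAddAt (cs : List (PySem.Set Int)) (i x t y : Int)
    (hi0 : 0 ≤ i) (hi : i < (cs.length : Int)) (ht0 : 0 ≤ t) (ht : t < (cs.length : Int)) :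
    y ∈ PySem.List.pyGetD (pvAddAt cs i x) t [] ↔ y ∈ PySem.List.pyGetD cs t [] ∨ (i = t ∧ x = y) := by
  rw [pvAddAt, pv_pyGetD_pySetD cs i t _ _ hi0 hi ht0 ht]
  split_ifs with h
  · subst h
    rw [PySem.Set.mem_add]
    tauto
  · constructor
    · tauto
    · rintro (hy | ⟨rfl, rfl⟩)
      · exact hy
      · exact absurd rfl h

theorem pv_mem_foldl_pvStep (ops : List (Int × Int)) : ∀ (cs : List (PySem.Set Int)),
    (∀ p ∈ ops, 0 ≤ p.1 ∧ p.1 < (cs.length : Int)) →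
    ∀ (t y : Int), 0 ≤ t → t < (cs.length : Int) →
    (y ∈ PySem.List.pyGetD (ops.foldl pvStep cs) t [] ↔
      y ∈ PySem.List.pyGetD cs t [] ∨ (t, y) ∈ ops) := by
  induction ops with
  | nil => intro cs _ t y ht0 ht; simp
  | cons p ops ih =>
    intro cs hops t y ht0 ht
    rw [List.foldl_cons]
    have hlen : ((pvStep cs p).length : Int) = (cs.length : Int) := by
      simp [pvStep, pv_length_pvAddAt]
    have hp := hops p (by simp)
    rw [ih (pvStep cs p) (fun q hq => by rw [hlen]; exact hops q (by simp [hq])) t y ht0 (by omega)]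
    rw [pvStep, pv_mem_pvAddAt cs p.1 p.2 t y hp.1 hp.2 ht0 ht]
    simp only [List.mem_cons, Prod.ext_iff]
    tauto

def pvShare (e f : Int × Int) : Bool := e.1 == f.1 || e.1 == f.2 || e.2 == f.1 || e.2 == f.2

theorem pvShare_symm (e f : Int × Int) : pvShare e f = true ↔ pvShare f e = true := by
  simp [pvShare, beq_iff_eq]; omega

def pvE (E : List (Int × Int)) (r : Nat) : Int × Int := E.getD r (0, 0)

def pvESpec (n : Int) (E : List (Int × Int)) (r : Nat) (y : Int) : Prop :=
  y = (pvE E r).1 ∨ y = (pvE E r).2 ∨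
  ∃ q : Nat, q < r ∧ pvShare (pvE E r) (pvE E q) = true ∧ y = n + (q : Int)

def pvEdges (adj : List (List Int)) (n : Int) : List (Int × Int) :=
  (PySem.List.pyRange 0 n 1).flatMap (fun u =>
    ((PySem.List.pyGetD adj u []).filter (fun v => decide (u < v))).map (fun v => (u, v)))

def pvOps1 (adj : List (List Int)) (n : Int) : List (Int × Int) :=
  (PySem.List.pyRange 0 n 1).flatMap (fun u => (PySem.List.pyGetD adj u []).map (fun v => (u, v)))

def pvOps2 (n : Int) (edges : List (Int × Int)) : List (Int × Int) :=
  (PySem.List.enumerate edges).flatMap (fun ie =>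
    (PySem.List.enumerate edges).flatMap (fun je =>
      if ie.1 < je.1 && (ie.2.1 == je.2.1 || ie.2.1 == je.2.2 || ie.2.2 == je.2.1 || ie.2.2 == je.2.2)
      then [(n + ie.1, n + je.1), (n + je.1, n + ie.1)] else []))

def pvOps3 (n : Int) (edges : List (Int × Int)) : List (Int × Int) :=
  (PySem.List.enumerate edges).flatMap (fun ie =>
    [(ie.2.1, n + ie.1), (n + ie.1, ie.2.1), (ie.2.2, n + ie.1), (n + ie.1, ie.2.2)])

theorem pvEdgesA_eq (adj : List (List Int)) (n : Int) :
    (PySem.List.pyRange 0 n 1).foldl (fun es u =>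
      (PySem.List.pyGetD adj u []).foldl (fun es2 v => if u < v then es2 ++ [(u, v)] else es2) es) []
    = pvEdges adj n := by
  have hfun : (fun (es : List (Int × Int)) u =>
      (PySem.List.pyGetD adj u []).foldl (fun es2 v => if u < v then es2 ++ [(u, v)] else es2) es)
      = (fun es u => es ++ ((PySem.List.pyGetD adj u []).filter (fun v => decide (u < v))).map (fun v => (u, v))) := by
    funext es u
    have := PySem.List.foldl_append_if (fun v => decide (u < v)) (fun v => ((u, v) : Int × Int))
      (PySem.List.pyGetD adj u []) es
    simpa using this
  rw [hfun, PySem.List.foldl_append_eq_flatMap]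
  simp [pvEdges]

theorem pvPhase1_eq (adj : List (List Int)) (n : Int) (cs : List (PySem.Set Int)) :
    (PySem.List.pyRange 0 n 1).foldl (fun cs u =>
      (PySem.List.pyGetD adj u []).foldl (fun cs2 v => pvAddAt cs2 u v) cs) cs
    = (pvOps1 adj n).foldl pvStep cs := by
  rw [pvOps1, List.foldl_flatMap]
  simp only [List.foldl_map]
  rfl

theorem pvPhase2_eq (n : Int) (edges : List (Int × Int)) (cs : List (PySem.Set Int)) :
    (PySem.List.enumerate edges).foldl (fun cs ie =>
      (PySem.List.enumerate edges).foldl (fun cs2 je =>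
        if ie.1 < je.1 && (ie.2.1 == je.2.1 || ie.2.1 == je.2.2 || ie.2.2 == je.2.1 || ie.2.2 == je.2.2)
        then pvAddAt (pvAddAt cs2 (n + ie.1) (n + je.1)) (n + je.1) (n + ie.1)
        else cs2) cs) cs
    = (pvOps2 n edges).foldl pvStep cs := by
  rw [pvOps2, List.foldl_flatMap]
  congr 1
  funext cs1 ie
  rw [List.foldl_flatMap]
  congr 1
  funext cs2 je
  split <;> rfl

theorem pvPhase3_eq (n : Int) (edges : List (Int × Int)) (cs : List (PySem.Set Int)) :
    (PySem.List.enumerate edges).foldl (fun cs ie =>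
      pvAddAt (pvAddAt (pvAddAt (pvAddAt cs ie.2.1 (n + ie.1)) (n + ie.1) ie.2.1) ie.2.2 (n + ie.1)) (n + ie.1) ie.2.2) cs
    = (pvOps3 n edges).foldl pvStep cs := by
  rw [pvOps3, List.foldl_flatMap]
  rfl

theorem pvEdges_valid (adj : List (List Int)) (n : Int)
    (hval : ∀ u : Int, 0 ≤ u → u < n → ∀ v ∈ PySem.List.pyGetD adj u ([] : List Int), 0 ≤ v ∧ v < n) :
    ∀ e ∈ pvEdges adj n, 0 ≤ e.1 ∧ e.1 < e.2 ∧ e.2 < n ∧ e.2 ∈ PySem.List.pyGetD adj e.1 ([] : List Int) := by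
  intro e he
  simp only [pvEdges, List.mem_flatMap, List.mem_map, List.mem_filter,
    PySem.List.mem_pyRange_one, decide_eq_true_eq] at he
  obtain ⟨u, ⟨hu0, hun⟩, v, ⟨hv, huv⟩, rfl⟩ := he
  exact ⟨hu0, huv, (hval u hu0 hun v hv).2, hv⟩

theorem pv_mem_enumerate (E : List (Int × Int)) (p : Int × (Int × Int)) :
    p ∈ PySem.List.enumerate E ↔ ∃ k : Nat, ∃ h : k < E.length, p = ((k : Int), E[k]) := by
  rw [PySem.List.mem_enumerate_iff]
  simp

theorem pv_memOps1 (adj : List (List Int)) (n : Int) (t y : Int) (ht0 : 0 ≤ t) (ht : t < n) :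
    ((t, y) ∈ pvOps1 adj n) ↔ y ∈ PySem.List.pyGetD adj t ([] : List Int) := by
  simp only [pvOps1, List.mem_flatMap, List.mem_map, PySem.List.mem_pyRange_one, Prod.mk.injEq]
  constructor
  · rintro ⟨u, ⟨_, _⟩, v, hv, rfl, rfl⟩
    exact hv
  · intro hy
    exact ⟨t, ⟨ht0, ht⟩, y, hy, rfl, rfl⟩

theorem pv_memOps1_slot (adj : List (List Int)) (n : Int) (t y : Int) :
    (t, y) ∈ pvOps1 adj n → 0 ≤ t ∧ t < n := by
  simp only [pvOps1, List.mem_flatMap, List.mem_map, PySem.List.mem_pyRange_one, Prod.mk.injEq]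
  rintro ⟨u, ⟨hu0, hun⟩, v, hv, rfl, rfl⟩
  exact ⟨hu0, hun⟩

theorem pv_memOps2 (n : Int) (E : List (Int × Int)) (t y : Int) :
    ((t, y) ∈ pvOps2 n E) ↔ ∃ k1 k2 : Nat, ∃ h1 : k1 < E.length, ∃ h2 : k2 < E.length,
      k1 < k2 ∧ pvShare E[k1] E[k2] = true ∧
      ((t = n + (k1 : Int) ∧ y = n + (k2 : Int)) ∨ (t = n + (k2 : Int) ∧ y = n + (k1 : Int))) := by
  simp only [pvOps2, List.mem_flatMap, pv_mem_enumerate]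
  constructor
  · rintro ⟨ie, ⟨k1, h1, rfl⟩, je, ⟨k2, h2, rfl⟩, hmem⟩
    rw [List.mem_ite_nil_right] at hmem
    obtain ⟨hc, hp⟩ := hmem
    simp only [Bool.and_eq_true, decide_eq_true_eq] at hc
    refine ⟨k1, k2, h1, h2, by exact_mod_cast hc.1, hc.2, ?_⟩
    simp only [List.mem_cons, Prod.mk.injEq] at hp
    tauto
  · rintro ⟨k1, k2, h1, h2, hk, hsh, hcase⟩
    refine ⟨((k1 : Int), E[k1]), ⟨k1, h1, rfl⟩, ((k2 : Int), E[k2]), ⟨k2, h2, rfl⟩, ?_⟩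
    rw [List.mem_ite_nil_right]
    constructor
    · simp only [Bool.and_eq_true, decide_eq_true_eq]
      exact ⟨by exact_mod_cast hk, hsh⟩
    · simp only [List.mem_cons, Prod.mk.injEq]
      tauto

theorem pv_memOps3 (n : Int) (E : List (Int × Int)) (t y : Int) :
    ((t, y) ∈ pvOps3 n E) ↔ ∃ k : Nat, ∃ h : k < E.length,
      ((t = E[k].1 ∧ y = n + (k : Int)) ∨ (t = n + (k : Int) ∧ y = E[k].1) ∨
       (t = E[k].2 ∧ y = n + (k : Int)) ∨ (t = n + (k : Int) ∧ y = E[k].2)) := by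
  simp only [pvOps3, List.mem_flatMap, pv_mem_enumerate]
  constructor
  · rintro ⟨ie, ⟨k, h, rfl⟩, hp⟩
    simp only [List.mem_cons, Prod.mk.injEq] at hp
    exact ⟨k, h, by tauto⟩
  · rintro ⟨k, h, hcase⟩
    refine ⟨((k : Int), E[k]), ⟨k, h, rfl⟩, ?_⟩
    simp only [List.mem_cons, Prod.mk.injEq]
    tauto

theorem pv_getD_eq_getElem {α : Type} (l : List α) (r : Nat) (d : α) (h : r < l.length) :
    l.getD r d = l[r] := by
  simp [List.getD_eq_getElem?_getD, List.getElem?_eq_getElem h]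

theorem pvOps_bounds (adj : List (List Int)) (n : Int) (hn : 0 ≤ n)
    (hval : ∀ u : Int, 0 ≤ u → u < n → ∀ v ∈ PySem.List.pyGetD adj u ([] : List Int), 0 ≤ v ∧ v < n) :
    ∀ p ∈ pvOps1 adj n ++ pvOps2 n (pvEdges adj n) ++ pvOps3 n (pvEdges adj n),
      (0 ≤ p.1 ∧ p.1 < n + ((pvEdges adj n).length : Int)) ∧
      (0 ≤ p.2 ∧ p.2 < n + ((pvEdges adj n).length : Int)) := by
  have hEv := pvEdges_valid adj n hval
  intro p hp
  have hm : 0 ≤ ((pvEdges adj n).length : Int) := by positivity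
  rcases List.mem_append.1 hp with hp' | hp3
  · rcases List.mem_append.1 hp' with hp1 | hp2
    · have hslot := pv_memOps1_slot adj n p.1 p.2 hp1
      have hy : p.2 ∈ PySem.List.pyGetD adj p.1 ([] : List Int) :=
        (pv_memOps1 adj n p.1 p.2 hslot.1 hslot.2).1 hp1
      have := hval p.1 hslot.1 hslot.2 p.2 hy
      omega
    · obtain ⟨k1, k2, h1, h2, hk, _, hc⟩ := (pv_memOps2 n (pvEdges adj n) p.1 p.2).1 hp2
      rcases hc with ⟨ht, hy⟩ | ⟨ht, hy⟩ <;> omega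
  · obtain ⟨k, h, hc⟩ := (pv_memOps3 n (pvEdges adj n) p.1 p.2).1 hp3
    have he := hEv (pvEdges adj n)[k] (List.getElem_mem h)
    rcases hc with ⟨ht, hy⟩ | ⟨ht, hy⟩ | ⟨ht, hy⟩ | ⟨ht, hy⟩ <;> omega

theorem pv_pyGetD_cs0 (total t : Int) (ht0 : 0 ≤ t) (ht : t < total) :
    PySem.List.pyGetD ((PySem.List.pyRange 0 total 1).map (fun _ => (PySem.Set.empty : PySem.Set Int))) t [] = [] := by
  rw [PySem.List.pyGetD_map_pyRange_of_nonneg _ total t _ ht0 ht]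
  rfl

theorem pv_memConfA (adj : List (List Int)) (n : Int) (hn : 0 ≤ n)
    (hval : ∀ u : Int, 0 ≤ u → u < n → ∀ v ∈ PySem.List.pyGetD adj u ([] : List Int), 0 ≤ v ∧ v < n)
    (t y : Int) (ht0 : 0 ≤ t) (ht : t < n + ((pvEdges adj n).length : Int)) :
    (y ∈ PySem.List.pyGetD
      ((pvOps1 adj n ++ pvOps2 n (pvEdges adj n) ++ pvOps3 n (pvEdges adj n)).foldl pvStep
        ((PySem.List.pyRange 0 (n + ((pvEdges adj n).length : Int)) 1).map (fun _ => (PySem.Set.empty : PySem.Set Int)))) t []) ↔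
    ((t, y) ∈ pvOps1 adj n ∨ (t, y) ∈ pvOps2 n (pvEdges adj n) ∨ (t, y) ∈ pvOps3 n (pvEdges adj n)) := by
  set E := pvEdges adj n with hE
  set total : Int := n + (E.length : Int) with htotal
  have hm : 0 ≤ (E.length : Int) := by positivity
  have hcslen : (((PySem.List.pyRange 0 total 1).map (fun _ => (PySem.Set.empty : PySem.Set Int))).length : Int) = total := by
    simp [PySem.List.length_pyRange_one]
    omega
  rw [pv_mem_foldl_pvStep _ _ (fun p hp => by
        rw [hcslen]; exact ((pvOps_bounds adj n hn hval) p hp).1) t y ht0 (by omega)]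
  rw [pv_pyGetD_cs0 total t ht0 (by omega)]
  simp only [List.not_mem_nil, false_or, List.mem_append]
  tauto

theorem pv_confA_vertex (adj : List (List Int)) (n : Int) (hn : 0 ≤ n)
    (hval : ∀ u : Int, 0 ≤ u → u < n → ∀ v ∈ PySem.List.pyGetD adj u ([] : List Int), 0 ≤ v ∧ v < n)
    (t y : Int) (ht0 : 0 ≤ t) (ht : t < n) (hy : y < t) :
    (y ∈ PySem.List.pyGetD
      ((pvOps1 adj n ++ pvOps2 n (pvEdges adj n) ++ pvOps3 n (pvEdges adj n)).foldl pvStep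
        ((PySem.List.pyRange 0 (n + ((pvEdges adj n).length : Int)) 1).map (fun _ => (PySem.Set.empty : PySem.Set Int)))) t []) ↔
    y ∈ PySem.List.pyGetD adj t ([] : List Int) := by
  have hm : 0 ≤ ((pvEdges adj n).length : Int) := by positivity
  rw [pv_memConfA adj n hn hval t y ht0 (by omega)]
  have hEv := pvEdges_valid adj n hval
  constructor
  · rintro (h1 | h2 | h3)
    · exact (pv_memOps1 adj n t y ht0 ht).1 h1
    · obtain ⟨k1, k2, _, _, _, _, hc⟩ := (pv_memOps2 n (pvEdges adj n) t y).1 h2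
      rcases hc with ⟨ht', _⟩ | ⟨ht', _⟩ <;> omega
    · obtain ⟨k, h, hc⟩ := (pv_memOps3 n (pvEdges adj n) t y).1 h3
      have he := hEv (pvEdges adj n)[k] (List.getElem_mem h)
      rcases hc with ⟨ht', hy'⟩ | ⟨ht', hy'⟩ | ⟨ht', hy'⟩ | ⟨ht', hy'⟩ <;> omega
  · intro h
    exact Or.inl ((pv_memOps1 adj n t y ht0 ht).2 h)

theorem pv_confA_edge (adj : List (List Int)) (n : Int) (hn : 0 ≤ n)
    (hval : ∀ u : Int, 0 ≤ u → u < n → ∀ v ∈ PySem.List.pyGetD adj u ([] : List Int), 0 ≤ v ∧ v < n)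
    (r : Nat) (hr : r < (pvEdges adj n).length) (y : Int) (hy : y < n + (r : Int)) :
    (y ∈ PySem.List.pyGetD
      ((pvOps1 adj n ++ pvOps2 n (pvEdges adj n) ++ pvOps3 n (pvEdges adj n)).foldl pvStep
        ((PySem.List.pyRange 0 (n + ((pvEdges adj n).length : Int)) 1).map (fun _ => (PySem.Set.empty : PySem.Set Int)))) (n + (r : Int)) []) ↔
    pvESpec n (pvEdges adj n) r y := by
  have hm : 0 ≤ ((pvEdges adj n).length : Int) := by positivity
  have hEv := pvEdges_valid adj n hval
  have hgetD : ∀ (q : Nat) (h : q < (pvEdges adj n).length), pvE (pvEdges adj n) q = (pvEdges adj n)[q] :=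
    fun q h => pv_getD_eq_getElem (pvEdges adj n) q _ h
  rw [pv_memConfA adj n hn hval (n + (r : Int)) y (by omega) (by omega)]
  constructor
  · rintro (h1 | h2 | h3)
    · have := pv_memOps1_slot adj n _ _ h1
      omega
    · obtain ⟨k1, k2, hk1, hk2, hlt, hsh, hc⟩ := (pv_memOps2 n (pvEdges adj n) (n + (r : Int)) y).1 h2
      rcases hc with ⟨ht', hy'⟩ | ⟨ht', hy'⟩
      · omega
      · have hk2r : k2 = r := by omega
        subst hk2r
        refine Or.inr (Or.inr ⟨k1, by omega, ?_, hy'⟩)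
        rw [hgetD k2 hk2, hgetD k1 hk1]
        exact (pvShare_symm _ _).2 hsh
    · obtain ⟨k, h, hc⟩ := (pv_memOps3 n (pvEdges adj n) (n + (r : Int)) y).1 h3
      have he := hEv (pvEdges adj n)[k] (List.getElem_mem h)
      rcases hc with ⟨ht', hy'⟩ | ⟨ht', hy'⟩ | ⟨ht', hy'⟩ | ⟨ht', hy'⟩
      · omega
      · have hkr : k = r := by omega
        subst hkr
        exact Or.inl (by rw [hgetD k h]; exact hy')
      · omega
      · have hkr : k = r := by omega
        subst hkr
        exact Or.inr (Or.inl (by rw [hgetD k h]; exact hy'))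
  · rintro (hy1 | hy2 | ⟨q, hq, hsh, rfl⟩)
    · refine Or.inr (Or.inr ((pv_memOps3 n (pvEdges adj n) _ _).2 ⟨r, hr, ?_⟩))
      rw [hgetD r hr] at hy1
      exact Or.inr (Or.inl ⟨rfl, hy1⟩)
    · refine Or.inr (Or.inr ((pv_memOps3 n (pvEdges adj n) _ _).2 ⟨r, hr, ?_⟩))
      rw [hgetD r hr] at hy2
      exact Or.inr (Or.inr (Or.inr ⟨rfl, hy2⟩))
    · refine Or.inr (Or.inl ((pv_memOps2 n (pvEdges adj n) _ _).2 ⟨q, r, by omega, hr, hq, ?_, Or.inr ⟨rfl, rfl⟩⟩))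
      rw [hgetD r hr, hgetD q (by omega)] at hsh
      exact (pvShare_symm _ _).1 hsh

theorem pvShare_iff (e f : Int × Int) :
    pvShare e f = true ↔ (e.1 = f.1 ∨ e.1 = f.2 ∨ e.2 = f.1 ∨ e.2 = f.2) := by
  simp [pvShare, beq_iff_eq]; tauto

theorem pv_pyGetD_append_left {α : Type} (xs ys : List α) (i : Int) (d : α)
    (h0 : 0 ≤ i) (h : i < (xs.length : Int)) :
    PySem.List.pyGetD (xs ++ ys) i d = PySem.List.pyGetD xs i d := by
  rw [pv_pyGetD_eq _ i d h0 (by simp; omega), pv_pyGetD_eq _ i d h0 h]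
  rw [List.getElem_append_left (by omega)]

theorem pv_pyGetD_append_length {α : Type} (xs : List α) (y : α) (d : α) :
    PySem.List.pyGetD (xs ++ [y]) (xs.length : Int) d = y := by
  rw [pv_pyGetD_eq _ _ d (by positivity) (by simp)]
  simp

theorem pvB_build (n : Int) (E : List (Int × Int)) (hn : 0 ≤ n)
    (hEv : ∀ e ∈ E, 0 ≤ e.1 ∧ e.1 < e.2 ∧ e.2 < n) :
    ∀ (es : List (Int × Int)) (s : Nat), E.drop s = es → s + es.length = E.length →
    ∀ (pred inc : List (List Int)),
      inc.length = n.toNat →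
      pred.length = n.toNat + s →
      (∀ w j : Int, 0 ≤ w → w < n →
        (j ∈ PySem.List.pyGetD inc w ([] : List Int) ↔
          ∃ q : Nat, q < s ∧ j = (q : Int) ∧ ((pvE E q).1 = w ∨ (pvE E q).2 = w))) →
      (∀ r : Nat, r < s → ∀ y : Int,
        y ∈ PySem.List.pyGetD pred (n + (r : Int)) ([] : List Int) ↔ pvESpec n E r y) →
      ((PySem.List.enumerate es (s : Int)).foldl (pvBuildStep n) (pred, inc)).1.length = n.toNat + E.length ∧
      (∀ t : Int, 0 ≤ t → t < n →
        PySem.List.pyGetD ((PySem.List.enumerate es (s : Int)).foldl (pvBuildStep n) (pred, inc)).1 t ([] : List Int)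
          = PySem.List.pyGetD pred t ([] : List Int)) ∧
      (∀ r : Nat, r < E.length → ∀ y : Int,
        y ∈ PySem.List.pyGetD ((PySem.List.enumerate es (s : Int)).foldl (pvBuildStep n) (pred, inc)).1 (n + (r : Int)) ([] : List Int)
          ↔ pvESpec n E r y) := by
  intro es
  induction es with
  | nil =>
    intro s hdrop hlen pred inc hinclen hpredlen hinc hpred
    have hs : s = E.length := by simpa using hlen
    refine ⟨by show pred.length = n.toNat + E.length; omega, fun t ht0 ht => rfl, fun r hr y => ?_⟩
    exact hpred r (by omega) y
  | cons e es' ih =>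
    intro s hdrop hlen pred inc hinclen hpredlen hinc hpred
    have hsE : s < E.length := by
      have := List.length_drop (l := E) (i := s)
      rw [hdrop] at this
      simp at this
      omega
    have hEs : E[s] = e := by
      have h0 : (E.drop s)[0]'(by rw [hdrop]; simp) = e := by simp [hdrop]
      rw [List.getElem_drop] at h0
      simpa using h0
    have hpvEs : pvE E s = e := by rw [pvE, pv_getD_eq_getElem E s _ hsE, hEs]
    have he : 0 ≤ e.1 ∧ e.1 < e.2 ∧ e.2 < n := hEv e (hEs ▸ List.getElem_mem hsE)
    have hdrop' : E.drop (s + 1) = es' := by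
      have h := congrArg (List.drop 1) hdrop
      rw [List.drop_drop] at h
      simpa [Nat.add_comm] using h
    -- unfold one step of the fold
    rw [PySem.List.enumerate_cons]
    rw [List.foldl_cons]
    have hstep : pvBuildStep n (pred, inc) ((s : Int), e) =
        (pred ++ [[e.1, e.2]
          ++ (PySem.List.pyGetD inc e.1 []).map (fun j => n + j)
          ++ (PySem.List.pyGetD inc e.2 []).map (fun j => n + j)],
         PySem.List.pySetD (PySem.List.pySetD inc e.1 (PySem.List.pyGetD inc e.1 [] ++ [(s : Int)])) e.2
           (PySem.List.pyGetD (PySem.List.pySetD inc e.1 (PySem.List.pyGetD inc e.1 [] ++ [(s : Int)])) e.2 [] ++ [(s : Int)])) := rfl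
    rw [hstep]
    have hinclen1 : (PySem.List.pySetD inc e.1 (PySem.List.pyGetD inc e.1 [] ++ [(s : Int)])).length = n.toNat := by
      rw [PySem.List.length_pySetD]; exact hinclen
    have hinclenInt : (inc.length : Int) = n := by omega
    -- new incidence invariant
    have hinc' : ∀ w j : Int, 0 ≤ w → w < n →
        (j ∈ PySem.List.pyGetD
            (PySem.List.pySetD (PySem.List.pySetD inc e.1 (PySem.List.pyGetD inc e.1 [] ++ [(s : Int)])) e.2
              (PySem.List.pyGetD (PySem.List.pySetD inc e.1 (PySem.List.pyGetD inc e.1 [] ++ [(s : Int)])) e.2 [] ++ [(s : Int)]))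
            w ([] : List Int) ↔
          ∃ q : Nat, q < s + 1 ∧ j = (q : Int) ∧ ((pvE E q).1 = w ∨ (pvE E q).2 = w)) := by
      intro w j hw0 hwn
      rw [pv_pyGetD_pySetD _ e.2 w _ _ (by omega) (by rw [PySem.List.length_pySetD]; omega) hw0 (by rw [PySem.List.length_pySetD]; omega)]
      by_cases hw2 : w = e.2
      · subst hw2
        rw [if_pos rfl]
        rw [pv_pyGetD_pySetD inc e.1 e.2 _ _ (by omega) (by omega) hw0 (by omega)]
        rw [if_neg (by omega)]
        simp only [List.mem_append, List.mem_singleton]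
        rw [hinc e.2 j hw0 hwn]
        constructor
        · rintro (⟨q, hq, rfl, hend⟩ | rfl)
          · exact ⟨q, by omega, rfl, hend⟩
          · exact ⟨s, by omega, rfl, by rw [hpvEs]; omega⟩
        · rintro ⟨q, hq, rfl, hend⟩
          by_cases hqs : q < s
          · exact Or.inl ⟨q, hqs, rfl, hend⟩
          · have hqs' : q = s := by omega
            subst hqs'
            exact Or.inr rfl
      · rw [if_neg hw2]
        rw [pv_pyGetD_pySetD inc e.1 w _ _ (by omega) (by omega) hw0 (by omega)]
        by_cases hw1 : w = e.1
        · subst hw1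
          rw [if_pos rfl]
          simp only [List.mem_append, List.mem_singleton]
          rw [hinc e.1 j hw0 hwn]
          constructor
          · rintro (⟨q, hq, rfl, hend⟩ | rfl)
            · exact ⟨q, by omega, rfl, hend⟩
            · exact ⟨s, by omega, rfl, by rw [hpvEs]; omega⟩
          · rintro ⟨q, hq, rfl, hend⟩
            by_cases hqs : q < s
            · exact Or.inl ⟨q, hqs, rfl, hend⟩
            · have hqs' : q = s := by omega
              subst hqs'
              rw [hpvEs] at hend
              omega
        · rw [if_neg hw1]
          rw [hinc w j hw0 hwn]
          constructor
          · rintro ⟨q, hq, rfl, hend⟩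
            exact ⟨q, by omega, rfl, hend⟩
          · rintro ⟨q, hq, rfl, hend⟩
            by_cases hqs : q < s
            · exact ⟨q, hqs, rfl, hend⟩
            · have hqs' : q = s := by omega
              subst hqs'
              rw [hpvEs] at hend
              omega
    -- new pred invariant
    have hpred' : ∀ r : Nat, r < s + 1 → ∀ y : Int,
        y ∈ PySem.List.pyGetD
            (pred ++ [[e.1, e.2]
              ++ (PySem.List.pyGetD inc e.1 []).map (fun j => n + j)
              ++ (PySem.List.pyGetD inc e.2 []).map (fun j => n + j)])
            (n + (r : Int)) ([] : List Int) ↔ pvESpec n E r y := by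
      intro r hr y
      by_cases hrs : r < s
      · rw [pv_pyGetD_append_left _ _ _ _ (by omega) (by push_cast; omega)]
        exact hpred r hrs y
      · have : r = s := by omega
        subst this
        have hidx : n + (r : Int) = (pred.length : Int) := by push_cast; omega
        rw [hidx, pv_pyGetD_append_length]
        simp only [List.mem_append, List.mem_cons, List.mem_map, List.not_mem_nil, or_false]
        rw [pvESpec, hpvEs]
        constructor
        · rintro (((rfl | rfl) | ⟨a, ha, rfl⟩) | ⟨a, ha, rfl⟩)
          · exact Or.inl rfl
          · exact Or.inr (Or.inl rfl)
          · obtain ⟨q, hq, rfl, hend⟩ := (hinc e.1 a (by omega) (by omega)).1 ha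
            refine Or.inr (Or.inr ⟨q, hq, ?_, rfl⟩)
            rw [pvShare_iff]
            omega
          · obtain ⟨q, hq, rfl, hend⟩ := (hinc e.2 a (by omega) (by omega)).1 ha
            refine Or.inr (Or.inr ⟨q, hq, ?_, rfl⟩)
            rw [pvShare_iff]
            omega
        · rintro (rfl | rfl | ⟨q, hq, hsh, rfl⟩)
          · exact Or.inl (Or.inl (Or.inl rfl))
          · exact Or.inl (Or.inl (Or.inr rfl))
          · rw [pvShare_iff] at hsh
            rcases hsh with h | h | h | h
            · exact Or.inl (Or.inr ⟨(q : Int), (hinc e.1 _ (by omega) (by omega)).2 ⟨q, hq, rfl, Or.inl h.symm⟩, rfl⟩)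
            · exact Or.inl (Or.inr ⟨(q : Int), (hinc e.1 _ (by omega) (by omega)).2 ⟨q, hq, rfl, Or.inr h.symm⟩, rfl⟩)
            · exact Or.inr ⟨(q : Int), (hinc e.2 _ (by omega) (by omega)).2 ⟨q, hq, rfl, Or.inl h.symm⟩, rfl⟩
            · exact Or.inr ⟨(q : Int), (hinc e.2 _ (by omega) (by omega)).2 ⟨q, hq, rfl, Or.inr h.symm⟩, rfl⟩
    have hcast : (s : Int) + 1 = ((s + 1 : Nat) : Int) := by push_cast; ring
    rw [hcast]
    obtain ⟨ihl, ihv, ihe⟩ := ih (s + 1) hdrop' (by simp at hlen ⊢; omega)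
      (pred ++ [[e.1, e.2]
        ++ (PySem.List.pyGetD inc e.1 []).map (fun j => n + j)
        ++ (PySem.List.pyGetD inc e.2 []).map (fun j => n + j)])
      (PySem.List.pySetD (PySem.List.pySetD inc e.1 (PySem.List.pyGetD inc e.1 [] ++ [(s : Int)])) e.2
        (PySem.List.pyGetD (PySem.List.pySetD inc e.1 (PySem.List.pyGetD inc e.1 [] ++ [(s : Int)])) e.2 [] ++ [(s : Int)]))
      (by rw [PySem.List.length_pySetD, PySem.List.length_pySetD]; exact hinclen)
      (by simp; omega)
      hinc' hpred'
    refine ⟨ihl, fun t ht0 ht => ?_, ihe⟩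
    rw [ihv t ht0 ht]
    exact pv_pyGetD_append_left _ _ _ _ ht0 (by push_cast; omega)

theorem pv_any_congr (l : List Int) (f g : Int → Bool) (h : ∀ x ∈ l, f x = g x) :
    l.any f = l.any g := by
  induction l with
  | nil => rfl
  | cons x xs ih => simp only [List.any_cons, h x (by simp), ih (fun y hy => h y (by simp [hy]))]

theorem pv_colorA_get (colors rest : List Int) (nb : Int) (hnb0 : 0 ≤ nb)
    (hnb : nb < ((colors ++ rest).length : Int)) :
    PySem.List.pyGetD (colors ++ rest) nb (-1)
      = if nb < (colors.length : Int) then PySem.List.pyGetD colors nb (-1)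
        else PySem.List.pyGetD rest (nb - colors.length) (-1) := by
  split_ifs with h
  · exact pv_pyGetD_append_left _ _ _ _ hnb0 h
  · rw [pv_pyGetD_eq _ nb _ hnb0 (by simpa using hnb),
        pv_pyGetD_eq rest (nb - colors.length) _ (by omega) (by simp at hnb ⊢; omega)]
    rw [List.getElem_append_right (by omega)]
    congr 1
    omega

theorem pvBt_eq (n k total : Int) (CF : List (PySem.Set Int)) (PRED : List (List Int))
    (hn : 0 ≤ n) (hnt : n ≤ total)
    (hbounds : ∀ t : Int, 0 ≤ t → t < total → ∀ y ∈ PySem.List.pyGetD CF t [], 0 ≤ y ∧ y < total)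
    (hmem : ∀ t y : Int, 0 ≤ t → t < total → y < t →
      (y ∈ PySem.List.pyGetD CF t [] ↔ y ∈ PySem.List.pyGetD PRED t []))
    (hpredlt : ∀ t : Int, 0 ≤ t → t < total → ∀ p ∈ PySem.List.pyGetD PRED t [], 0 ≤ p ∧ p < t) :
    ∀ (fuel : Nat) (idx : Int) (colors : List Int),
      0 ≤ idx → idx ≤ total → fuel = (total - idx).toNat →
      colors.length = idx.toNat → (∀ x ∈ colors, 0 ≤ x) →
      pvBtA total k CF fuel idx (colors ++ List.replicate (total - idx).toNat (-1))
        = pvAssign total k PRED fuel idx colors := by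
  intro fuel
  induction fuel with
  | zero =>
    intro idx colors h0 hle hfuel hlen hpos
    have : idx = total := by omega
    subst this
    simp [pvBtA, pvAssign]
  | succ f' ih =>
    intro idx colors h0 hle hfuel hlen hpos
    rw [pvBtA, pvAssign]
    by_cases hidx : idx = total
    · simp [hidx]
    · have hlt : idx < total := by omega
      rw [if_neg (by simpa using hidx), if_neg (by simpa using hidx)]
      apply pv_any_congr
      intro c hc
      have hc0 : 0 ≤ c := (PySem.List.mem_pyRange_one.1 hc).1
      have hcheck :
          ((PySem.List.pyGetD CF idx []).filter
            (fun nb => decide (0 ≤ PySem.List.pyGetD (colors ++ List.replicate (total - idx).toNat (-1)) nb (-1)))).all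
            (fun nb => PySem.List.pyGetD (colors ++ List.replicate (total - idx).toNat (-1)) nb (-1) != c)
          = (PySem.List.pyGetD PRED idx []).all (fun p => PySem.List.pyGetD colors p (-1) != c) := by
        rw [Bool.eq_iff_iff]
        simp only [List.all_eq_true, List.mem_filter, decide_eq_true_eq, bne_iff_ne, ne_eq]
        have hclen : ((colors ++ List.replicate (total - idx).toNat (-1)).length : Int) = total := by
          simp; omega
        constructor
        · intro hA p hp
          obtain ⟨hp0, hplt⟩ := hpredlt idx h0 hlt p hp
          have hpCF : p ∈ PySem.List.pyGetD CF idx [] := (hmem idx p h0 hlt hplt).2 hp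
          have hget : PySem.List.pyGetD (colors ++ List.replicate (total - idx).toNat (-1)) p (-1)
              = PySem.List.pyGetD colors p (-1) :=
            pv_colorA_get colors _ p hp0 (by omega) |>.trans (by rw [if_pos (by omega)])
          have := hA p ⟨hpCF, by rw [hget]; rw [pv_pyGetD_eq colors p _ hp0 (by omega)]; exact hpos _ (List.getElem_mem _)⟩
          rw [hget] at this
          exact this
        · intro hB nb hnb
          obtain ⟨hnbCF, hnbge⟩ := hnb
          obtain ⟨hnb0, hnblt⟩ := hbounds idx h0 hlt nb hnbCF
          have hnbi : nb < idx := by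
            by_contra hcon
            push_neg at hcon
            rw [pv_colorA_get colors _ nb hnb0 (by omega), if_neg (by omega)] at hnbge
            rw [pv_pyGetD_eq (List.replicate (total - idx).toNat (-1)) _ _ (by omega) (by simp; omega)] at hnbge
            simp at hnbge
          have hget : PySem.List.pyGetD (colors ++ List.replicate (total - idx).toNat (-1)) nb (-1)
              = PySem.List.pyGetD colors nb (-1) :=
            pv_colorA_get colors _ nb hnb0 (by omega) |>.trans (by rw [if_pos (by omega)])
          rw [hget]
          exact hB nb ((hmem idx nb h0 hlt hnbi).1 hnbCF)
      rw [hcheck]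
      have hset : PySem.List.pySetD (colors ++ List.replicate (total - idx).toNat (-1)) idx c
          = (colors ++ [c]) ++ List.replicate (total - (idx + 1)).toNat (-1) := by
        rw [PySem.List.pySetD_of_nonneg _ _ h0]
        have hR : (total - idx).toNat = (total - (idx + 1)).toNat + 1 := by omega
        rw [hR, List.replicate_succ]
        have hidxn : idx.toNat = colors.length := by omega
        rw [hidxn, List.set_append_right _ _ (by omega)]
        simp
      rw [hset]
      rw [ih (idx + 1) (colors ++ [c]) (by omega) (by omega) (by omega) (by simp; omega)
        (by intro x hx; rcases List.mem_append.1 hx with h | h; exact hpos x h; simp at h; omega)]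



theorem pv_confA_val_bounds (adj : List (List Int)) (n : Int) (hn : 0 ≤ n)
    (hval : ∀ u : Int, 0 ≤ u → u < n → ∀ v ∈ PySem.List.pyGetD adj u ([] : List Int), 0 ≤ v ∧ v < n)
    (t y : Int) (ht0 : 0 ≤ t) (ht : t < n + ((pvEdges adj n).length : Int)) :
    y ∈ PySem.List.pyGetD
      ((pvOps1 adj n ++ pvOps2 n (pvEdges adj n) ++ pvOps3 n (pvEdges adj n)).foldl pvStep
        ((PySem.List.pyRange 0 (n + ((pvEdges adj n).length : Int)) 1).map (fun _ => (PySem.Set.empty : PySem.Set Int)))) t [] →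
    0 ≤ y ∧ y < n + ((pvEdges adj n).length : Int) := by
  rw [pv_memConfA adj n hn hval t y ht0 ht]
  rintro (h | h | h)
  · exact ((pvOps_bounds adj n hn hval) (t, y) (by simp [h])).2
  · exact ((pvOps_bounds adj n hn hval) (t, y) (by simp [h])).2
  · exact ((pvOps_bounds adj n hn hval) (t, y) (by simp [h])).2

theorem pv_main (adj : List (List Int)) (n k : Int) (hn : 0 ≤ n) (hlen : n ≤ (adj.length : Int))
    (hval : ∀ u : Int, 0 ≤ u → u < n → ∀ v ∈ PySem.List.pyGetD adj u ([] : List Int), 0 ≤ v ∧ v < n) :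
    can_total_color_py adj n k = can_total_color_py_alt adj n k := by
  simp only [can_total_color_py, can_total_color_py_alt]
  rw [pvEdgesA_eq adj n]
  rw [pvPhase1_eq, pvPhase2_eq, pvPhase3_eq, ← List.foldl_append, ← List.foldl_append]
  have hBedges : (PySem.List.pyRange 0 n 1).flatMap (fun u =>
      ((PySem.List.pyGetD adj u []).filter (fun v => decide (u < v))).map (fun v => (u, v))) = pvEdges adj n := rfl
  rw [hBedges]
  rw [← List.append_assoc]
  have hEv0 := pvEdges_valid adj n hval
  have hEv : ∀ e ∈ pvEdges adj n, 0 ≤ e.1 ∧ e.1 < e.2 ∧ e.2 < n :=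
    fun e he => ⟨(hEv0 e he).1, (hEv0 e he).2.1, (hEv0 e he).2.2.1⟩
  obtain ⟨hPlen, hPvert, hPedge⟩ :=
    pvB_build n (pvEdges adj n) hn hEv (pvEdges adj n) 0 rfl (by simp)
      ((PySem.List.pyRange 0 n 1).map (fun u =>
        (PySem.List.pyGetD adj u []).filter (fun v => decide (0 ≤ v) && decide (v < u))))
      ((PySem.List.pyRange 0 n 1).map (fun _ => ([] : List Int)))
      (by simp [PySem.List.length_pyRange_one])
      (by simp)
      (by
        intro w j hw0 hwn
        rw [PySem.List.pyGetD_map_pyRange_of_nonneg _ n w _ hw0 hwn]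
        simp)
      (by intro r hr; omega)
  rw [Nat.cast_zero] at hPvert hPedge
  have hbounds : ∀ t : Int, 0 ≤ t → t < n + ((pvEdges adj n).length : Int) →
      ∀ y ∈ PySem.List.pyGetD
        ((pvOps1 adj n ++ pvOps2 n (pvEdges adj n) ++ pvOps3 n (pvEdges adj n)).foldl pvStep
          ((PySem.List.pyRange 0 (n + ((pvEdges adj n).length : Int)) 1).map (fun _ => (PySem.Set.empty : PySem.Set Int)))) t [],
      0 ≤ y ∧ y < n + ((pvEdges adj n).length : Int) :=
    fun t ht0 ht y hy => pv_confA_val_bounds adj n hn hval t y ht0 ht hy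
  have hmem : ∀ t y : Int, 0 ≤ t → t < n + ((pvEdges adj n).length : Int) → y < t →
      (y ∈ PySem.List.pyGetD
        ((pvOps1 adj n ++ pvOps2 n (pvEdges adj n) ++ pvOps3 n (pvEdges adj n)).foldl pvStep
          ((PySem.List.pyRange 0 (n + ((pvEdges adj n).length : Int)) 1).map (fun _ => (PySem.Set.empty : PySem.Set Int)))) t [] ↔
       y ∈ PySem.List.pyGetD
        ((PySem.List.enumerate (pvEdges adj n)).foldl (pvBuildStep n)
          ((PySem.List.pyRange 0 n 1).map (fun u =>
            (PySem.List.pyGetD adj u []).filter (fun v => decide (0 ≤ v) && decide (v < u))),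
           (PySem.List.pyRange 0 n 1).map (fun _ => ([] : List Int)))).1 t []) := by
    intro t y ht0 ht hy
    by_cases htn : t < n
    · rw [pv_confA_vertex adj n hn hval t y ht0 htn hy]
      rw [hPvert t ht0 htn]
      rw [PySem.List.pyGetD_map_pyRange_of_nonneg _ n t _ ht0 htn]
      simp only [List.mem_filter, Bool.and_eq_true, decide_eq_true_eq]
      constructor
      · intro h
        exact ⟨h, (hval t ht0 htn y h).1, hy⟩
      · rintro ⟨h, _, _⟩
        exact h
    · push_neg at htn
      obtain ⟨r, rfl, hrE⟩ : ∃ r : Nat, t = n + (r : Int) ∧ r < (pvEdges adj n).length :=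
        ⟨(t - n).toNat, by omega, by omega⟩
      rw [pv_confA_edge adj n hn hval r hrE y hy]
      rw [hPedge r hrE y]
  have hpredlt : ∀ t : Int, 0 ≤ t → t < n + ((pvEdges adj n).length : Int) →
      ∀ p ∈ PySem.List.pyGetD
        ((PySem.List.enumerate (pvEdges adj n)).foldl (pvBuildStep n)
          ((PySem.List.pyRange 0 n 1).map (fun u =>
            (PySem.List.pyGetD adj u []).filter (fun v => decide (0 ≤ v) && decide (v < u))),
           (PySem.List.pyRange 0 n 1).map (fun _ => ([] : List Int)))).1 t [],
      0 ≤ p ∧ p < t := by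
    intro t ht0 ht p hp
    by_cases htn : t < n
    · rw [hPvert t ht0 htn, PySem.List.pyGetD_map_pyRange_of_nonneg _ n t _ ht0 htn] at hp
      simp only [List.mem_filter, Bool.and_eq_true, decide_eq_true_eq] at hp
      exact ⟨hp.2.1, hp.2.2⟩
    · push_neg at htn
      obtain ⟨r, rfl, hrE⟩ : ∃ r : Nat, t = n + (r : Int) ∧ r < (pvEdges adj n).length :=
        ⟨(t - n).toNat, by omega, by omega⟩
      rw [hPedge r hrE p] at hp
      have hEr : pvE (pvEdges adj n) r = (pvEdges adj n)[r] := pv_getD_eq_getElem _ r _ hrE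
      have her := hEv (pvEdges adj n)[r] (List.getElem_mem hrE)
      rcases hp with h | h | ⟨q, hq, _, rfl⟩
      · rw [hEr] at h
        omega
      · rw [hEr] at h
        omega
      · omega
  have hm0 : (0 : Int) ≤ ((pvEdges adj n).length : Int) := by positivity
  have hfinal := pvBt_eq n k (n + ((pvEdges adj n).length : Int)) _ _ hn (by omega)
    hbounds hmem hpredlt (n + ((pvEdges adj n).length : Int)).toNat 0 []
    le_rfl (by omega) (by omega) (by simp) (by simp)
  simpa [PySem.List.pyRepeat_singleton] using hfinal

-- trivial corner: n < 0 (so range(n) is empty, total = n < 0) and k ≤ 0 (no color to try)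
theorem pv_trivial (adj : List (List Int)) (n k : Int) (hn : n < 0) (hk : k ≤ 0) :
    can_total_color_py adj n k = can_total_color_py_alt adj n k := by
  simp only [can_total_color_py, can_total_color_py_alt]
  rw [PySem.List.pyRange_one_eq_nil (by omega)]
  simp only [List.foldl_nil, List.map_nil, List.flatMap_nil, List.length_nil]
  rw [pvBtA.eq_def, pvAssign.eq_def]
  simp [Int.toNat_of_nonpos (le_of_lt hn), show ¬((0:Int) = n) by omega]

-- ===== VERDICT (by name: the statement is the Claim_ definition above) =====
theorem can_total_color_py_spec : Claim_equal_can_total_color_py := by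
  intro adj n k hdom hpre
  unfold Spec_can_total_color_py
  rcases hpre with ⟨hn, hk⟩ | ⟨hn, hlen, hrows⟩
  · exact pv_trivial adj n k hn hk
  · refine pv_main adj n k hn hlen ?_
    intro u hu0 hun v hv
    rw [pv_pyGetD_eq adj u [] hu0 (by omega)] at hv
    have hmem : adj[u.toNat] ∈ adj.take n.toNat := by
      have hg : (adj.take n.toNat)[u.toNat]'(by simp; omega) = adj[u.toNat]'(by omega) :=
        List.getElem_take
      rw [← hg]
      exact List.getElem_mem _
    exact (hrows _ hmem).2 v hv
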